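-- pv_equiv track=rewrite | github.com/senthilcaesar/ai-doctor | systems_medicine.py | suggest_lifestyle_interventions
-- ===== SOURCE A (Python) =====
-- def suggest_lifestyle_interventions(affected_systems):
--     """
--     Suggest lifestyle interventions based on affected body systems.
--
--     Args:
--         affected_systems (dict): Dictionary of affected systems and their scores
--
--     Returns:
--         dict: Dictionary of suggested interventions by category
--     """
--     interventions = {
--         "Diet": [],
--         "Sleep": [],
--         "Exercise": [],
--         "Stress Management": [],
--         "Environmental": []
--     }
--
--     # Diet interventions
--     if "Digestive" in affected_systems or "Immune" in affected_systems or "Metabolic" in affected_systems: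
--         interventions["Diet"].append("Consider an anti-inflammatory diet rich in whole foods, vegetables, and omega-3 fatty acids")
--         interventions["Diet"].append("Identify and eliminate potential food sensitivities")
--         interventions["Diet"].append("Ensure adequate fiber intake to support gut microbiome health")
--
--     if "Endocrine" in affected_systems or "Metabolic" in affected_systems:
--         interventions["Diet"].append("Balance blood sugar by reducing refined carbohydrates and increasing protein and healthy fats")
--         interventions["Diet"].append("Consider intermittent fasting if appropriate for your condition")
--
--     if "Cardiovascular" in affected_systems:
--         interventions["Diet"].append("Reduce sodium intake and increase potassium-rich foods")
--         interventions["Diet"].append("Include heart-healthy fats like olive oil and avocados")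
--
--     if "Neurological" in affected_systems or "Mental Health" in affected_systems:
--         interventions["Diet"].append("Increase intake of omega-3 fatty acids and antioxidant-rich foods")
--         interventions["Diet"].append("Consider Mediterranean diet pattern which supports brain health")
--
--     # Sleep interventions
--     if "Neurological" in affected_systems or "Endocrine" in affected_systems or "Mental Health" in affected_systems:
--         interventions["Sleep"].append("Establish a consistent sleep schedule with regular sleep and wake times")
--         interventions["Sleep"].append("Create a relaxing bedtime routine to signal the body it's time to sleep")
--         interventions["Sleep"].append("Optimize sleep environment: dark, quiet, cool room")
--
--     if "Respiratory" in affected_systems or "Cardiovascular" in affected_systems: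
--         interventions["Sleep"].append("Consider evaluation for sleep apnea if you have symptoms like snoring or daytime fatigue")
--         interventions["Sleep"].append("Elevate head of bed if you experience nighttime breathing difficulties")
--
--     # Exercise interventions
--     if "Musculoskeletal" in affected_systems or "Metabolic" in affected_systems:
--         interventions["Exercise"].append("Incorporate strength training 2-3 times per week to support muscle and bone health")
--         interventions["Exercise"].append("Include flexibility exercises like stretching or yoga to improve joint mobility")
--
--     if "Cardiovascular" in affected_systems or "Respiratory" in affected_systems:
--         interventions["Exercise"].append("Aim for 150 minutes of moderate aerobic activity weekly")
--         interventions["Exercise"].append("Consider interval training for cardiovascular health if appropriate for your fitness level")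
--
--     if "Mental Health" in affected_systems or "Neurological" in affected_systems:
--         interventions["Exercise"].append("Include daily movement for mood regulation and cognitive benefits")
--         interventions["Exercise"].append("Consider mind-body exercises like tai chi or yoga")
--
--     # Stress management interventions
--     if "Mental Health" in affected_systems or "Neurological" in affected_systems or "Endocrine" in affected_systems:
--         interventions["Stress Management"].append("Practice daily mindfulness meditation or deep breathing exercises")
--         interventions["Stress Management"].append("Consider cognitive behavioral techniques to manage stress responses")
--         interventions["Stress Management"].append("Establish healthy boundaries in work and personal life")
--
--     if "Digestive" in affected_systems or "Immune" in affected_systems: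
--         interventions["Stress Management"].append("Practice relaxation techniques before meals to support digestion")
--         interventions["Stress Management"].append("Consider gut-directed hypnotherapy for digestive symptoms exacerbated by stress")
--
--     if "Cardiovascular" in affected_systems:
--         interventions["Stress Management"].append("Monitor stress effects on blood pressure and heart rate")
--         interventions["Stress Management"].append("Practice heart rate variability biofeedback techniques")
--
--     # Environmental interventions
--     if "Respiratory" in affected_systems or "Immune" in affected_systems or "Integumentary" in affected_systems:
--         interventions["Environmental"].append("Minimize exposure to environmental allergens and toxins")
--         interventions["Environmental"].append("Consider air purification in home and work environments")
--         interventions["Environmental"].append("Use non-toxic personal care and cleaning products")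
--
--     if "Neurological" in affected_systems or "Endocrine" in affected_systems:
--         interventions["Environmental"].append("Reduce exposure to endocrine-disrupting chemicals in food containers and products")
--         interventions["Environmental"].append("Create a low-EMF sleep environment by removing electronics from bedroom")
--
--     # Remove empty categories
--     for category in list(interventions.keys()):
--         if not interventions[category]:
--             del interventions[category]
--
--     return interventions
-- ===== SOURCE B (Python) =====
-- # Inverted index: each system name maps to the rule numbers it can trigger; one pass
-- # over the input collects the set of fired rules, then the output is assembled from
-- # flat per-rule tables.  No per-rule scanning of trigger lists at query time.
--
-- SYSTEM_RULES = {
--     "Digestive": (0, 10),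
--     "Immune": (0, 10, 12),
--     "Metabolic": (0, 1, 6),
--     "Endocrine": (1, 4, 9, 13),
--     "Cardiovascular": (2, 5, 7, 11),
--     "Neurological": (3, 4, 8, 9, 13),
--     "Mental Health": (3, 4, 8, 9),
--     "Musculoskeletal": (6,),
--     "Respiratory": (5, 7, 12),
--     "Integumentary": (12,),
-- }
--
-- RULE_MSGS = [
--     ["Consider an anti-inflammatory diet rich in whole foods, vegetables, and omega-3 fatty acids",
--      "Identify and eliminate potential food sensitivities",
--      "Ensure adequate fiber intake to support gut microbiome health"],
--     ["Balance blood sugar by reducing refined carbohydrates and increasing protein and healthy fats",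
--      "Consider intermittent fasting if appropriate for your condition"],
--     ["Reduce sodium intake and increase potassium-rich foods",
--      "Include heart-healthy fats like olive oil and avocados"],
--     ["Increase intake of omega-3 fatty acids and antioxidant-rich foods",
--      "Consider Mediterranean diet pattern which supports brain health"],
--     ["Establish a consistent sleep schedule with regular sleep and wake times",
--      "Create a relaxing bedtime routine to signal the body it's time to sleep",
--      "Optimize sleep environment: dark, quiet, cool room"],
--     ["Consider evaluation for sleep apnea if you have symptoms like snoring or daytime fatigue",
--      "Elevate head of bed if you experience nighttime breathing difficulties"],
--     ["Incorporate strength training 2-3 times per week to support muscle and bone health",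
--      "Include flexibility exercises like stretching or yoga to improve joint mobility"],
--     ["Aim for 150 minutes of moderate aerobic activity weekly",
--      "Consider interval training for cardiovascular health if appropriate for your fitness level"],
--     ["Include daily movement for mood regulation and cognitive benefits",
--      "Consider mind-body exercises like tai chi or yoga"],
--     ["Practice daily mindfulness meditation or deep breathing exercises",
--      "Consider cognitive behavioral techniques to manage stress responses",
--      "Establish healthy boundaries in work and personal life"],
--     ["Practice relaxation techniques before meals to support digestion",
--      "Consider gut-directed hypnotherapy for digestive symptoms exacerbated by stress"],
--     ["Monitor stress effects on blood pressure and heart rate",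
--      "Practice heart rate variability biofeedback techniques"],
--     ["Minimize exposure to environmental allergens and toxins",
--      "Consider air purification in home and work environments",
--      "Use non-toxic personal care and cleaning products"],
--     ["Reduce exposure to endocrine-disrupting chemicals in food containers and products",
--      "Create a low-EMF sleep environment by removing electronics from bedroom"],
-- ]
--
-- CATEGORY_RULES = {
--     "Diet": (0, 1, 2, 3),
--     "Sleep": (4, 5),
--     "Exercise": (6, 7, 8),
--     "Stress Management": (9, 10, 11),
--     "Environmental": (12, 13),
-- }
--
--
-- def suggest_lifestyle_interventions(affected_systems):
--     fired = set()
--     for system in affected_systems: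
--         fired.update(SYSTEM_RULES.get(system, ()))
--     out = {}
--     for cat, idxs in CATEGORY_RULES.items():
--         msgs = [m for i in idxs if i in fired for m in RULE_MSGS[i]]
--         if msgs:
--             out[cat] = msgs
--     return out
-- ===== Notes on version B (the rewrite author's own statement) =====
-- stated objective: alternative
-- what changed: Replaces A's cascade of per-category membership tests and appends (plus an empty-category deletion pass) by an inverted index from system name to the rule numbers it triggers: one pass over the input builds the set of fired rules, and the result is assembled from flat per-rule message tables.
import Mathlib
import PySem

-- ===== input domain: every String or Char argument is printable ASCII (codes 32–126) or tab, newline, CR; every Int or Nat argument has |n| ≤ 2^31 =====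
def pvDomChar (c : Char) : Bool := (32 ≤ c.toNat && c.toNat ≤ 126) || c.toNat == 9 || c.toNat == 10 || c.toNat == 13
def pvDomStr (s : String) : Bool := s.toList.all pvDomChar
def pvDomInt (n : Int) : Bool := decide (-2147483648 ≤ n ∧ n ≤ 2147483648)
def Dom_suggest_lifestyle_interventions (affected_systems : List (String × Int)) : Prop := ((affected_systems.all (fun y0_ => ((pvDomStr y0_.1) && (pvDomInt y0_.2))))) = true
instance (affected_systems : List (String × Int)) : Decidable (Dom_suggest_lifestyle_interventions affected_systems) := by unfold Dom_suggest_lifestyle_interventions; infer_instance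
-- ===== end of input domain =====

-- B replaces A's per-category if/append cascade by an inverted index (system name → rule
-- numbers it triggers): one pass over the input collects the fired-rule set, and the output
-- is assembled from flat per-rule tables (alternative decomposition, same cost).

-- ===== PORT A =====
-- "k in affected_systems" (Python dict key test) is ported as membership of k in the key list.
def hasKey (xs : List (String × Int)) (t : String) : Bool := (xs.map Prod.fst).contains t

def suggest_lifestyle_interventions (affected_systems : List (String × Int)) : List (String × List String) :=
  let d0 : PySem.Dict String (List String) :=
    PySem.Dict.ofList [("Diet", []), ("Sleep", []), ("Exercise", []),
                       ("Stress Management", []), ("Environmental", [])]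
  -- Diet interventions
  let d1 := if hasKey affected_systems "Digestive" || hasKey affected_systems "Immune" || hasKey affected_systems "Metabolic" then
      ((d0.modify "Diet" [] (· ++ ["Consider an anti-inflammatory diet rich in whole foods, vegetables, and omega-3 fatty acids"])).modify
        "Diet" [] (· ++ ["Identify and eliminate potential food sensitivities"])).modify
        "Diet" [] (· ++ ["Ensure adequate fiber intake to support gut microbiome health"])
    else d0
  let d2 := if hasKey affected_systems "Endocrine" || hasKey affected_systems "Metabolic" then
      (d1.modify "Diet" [] (· ++ ["Balance blood sugar by reducing refined carbohydrates and increasing protein and healthy fats"])).modify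
        "Diet" [] (· ++ ["Consider intermittent fasting if appropriate for your condition"])
    else d1
  let d3 := if hasKey affected_systems "Cardiovascular" then
      (d2.modify "Diet" [] (· ++ ["Reduce sodium intake and increase potassium-rich foods"])).modify
        "Diet" [] (· ++ ["Include heart-healthy fats like olive oil and avocados"])
    else d2
  let d4 := if hasKey affected_systems "Neurological" || hasKey affected_systems "Mental Health" then
      (d3.modify "Diet" [] (· ++ ["Increase intake of omega-3 fatty acids and antioxidant-rich foods"])).modify
        "Diet" [] (· ++ ["Consider Mediterranean diet pattern which supports brain health"])
    else d3
  -- Sleep interventions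
  let d5 := if hasKey affected_systems "Neurological" || hasKey affected_systems "Endocrine" || hasKey affected_systems "Mental Health" then
      ((d4.modify "Sleep" [] (· ++ ["Establish a consistent sleep schedule with regular sleep and wake times"])).modify
        "Sleep" [] (· ++ ["Create a relaxing bedtime routine to signal the body it's time to sleep"])).modify
        "Sleep" [] (· ++ ["Optimize sleep environment: dark, quiet, cool room"])
    else d4
  let d6 := if hasKey affected_systems "Respiratory" || hasKey affected_systems "Cardiovascular" then
      (d5.modify "Sleep" [] (· ++ ["Consider evaluation for sleep apnea if you have symptoms like snoring or daytime fatigue"])).modify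
        "Sleep" [] (· ++ ["Elevate head of bed if you experience nighttime breathing difficulties"])
    else d5
  -- Exercise interventions
  let d7 := if hasKey affected_systems "Musculoskeletal" || hasKey affected_systems "Metabolic" then
      (d6.modify "Exercise" [] (· ++ ["Incorporate strength training 2-3 times per week to support muscle and bone health"])).modify
        "Exercise" [] (· ++ ["Include flexibility exercises like stretching or yoga to improve joint mobility"])
    else d6
  let d8 := if hasKey affected_systems "Cardiovascular" || hasKey affected_systems "Respiratory" then
      (d7.modify "Exercise" [] (· ++ ["Aim for 150 minutes of moderate aerobic activity weekly"])).modify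
        "Exercise" [] (· ++ ["Consider interval training for cardiovascular health if appropriate for your fitness level"])
    else d7
  let d9 := if hasKey affected_systems "Mental Health" || hasKey affected_systems "Neurological" then
      (d8.modify "Exercise" [] (· ++ ["Include daily movement for mood regulation and cognitive benefits"])).modify
        "Exercise" [] (· ++ ["Consider mind-body exercises like tai chi or yoga"])
    else d8
  -- Stress management interventions
  let d10 := if hasKey affected_systems "Mental Health" || hasKey affected_systems "Neurological" || hasKey affected_systems "Endocrine" then
      ((d9.modify "Stress Management" [] (· ++ ["Practice daily mindfulness meditation or deep breathing exercises"])).modify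
        "Stress Management" [] (· ++ ["Consider cognitive behavioral techniques to manage stress responses"])).modify
        "Stress Management" [] (· ++ ["Establish healthy boundaries in work and personal life"])
    else d9
  let d11 := if hasKey affected_systems "Digestive" || hasKey affected_systems "Immune" then
      (d10.modify "Stress Management" [] (· ++ ["Practice relaxation techniques before meals to support digestion"])).modify
        "Stress Management" [] (· ++ ["Consider gut-directed hypnotherapy for digestive symptoms exacerbated by stress"])
    else d10
  let d12 := if hasKey affected_systems "Cardiovascular" then
      (d11.modify "Stress Management" [] (· ++ ["Monitor stress effects on blood pressure and heart rate"])).modify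
        "Stress Management" [] (· ++ ["Practice heart rate variability biofeedback techniques"])
    else d11
  -- Environmental interventions
  let d13 := if hasKey affected_systems "Respiratory" || hasKey affected_systems "Immune" || hasKey affected_systems "Integumentary" then
      ((d12.modify "Environmental" [] (· ++ ["Minimize exposure to environmental allergens and toxins"])).modify
        "Environmental" [] (· ++ ["Consider air purification in home and work environments"])).modify
        "Environmental" [] (· ++ ["Use non-toxic personal care and cleaning products"])
    else d12
  let d14 := if hasKey affected_systems "Neurological" || hasKey affected_systems "Endocrine" then
      (d13.modify "Environmental" [] (· ++ ["Reduce exposure to endocrine-disrupting chemicals in food containers and products"])).modify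
        "Environmental" [] (· ++ ["Create a low-EMF sleep environment by removing electronics from bedroom"])
    else d13
  -- Remove empty categories
  let dF := (["Diet", "Sleep", "Exercise", "Stress Management", "Environmental"] : List String).foldl
      (fun d c => if (d.getD c []).isEmpty then d.erase c else d) d14
  dF.items

-- ===== PORT B =====
-- SYSTEM_RULES.get(system, ()) — a literal dict lookup, ported as the corresponding if-chain.
def sysRules (s : String) : List Nat :=
  if s == "Digestive" then [0, 10]
  else if s == "Immune" then [0, 10, 12]
  else if s == "Metabolic" then [0, 1, 6]
  else if s == "Endocrine" then [1, 4, 9, 13]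
  else if s == "Cardiovascular" then [2, 5, 7, 11]
  else if s == "Neurological" then [3, 4, 8, 9, 13]
  else if s == "Mental Health" then [3, 4, 8, 9]
  else if s == "Musculoskeletal" then [6]
  else if s == "Respiratory" then [5, 7, 12]
  else if s == "Integumentary" then [12]
  else []

def ruleMsgs : List (List String) :=
  [["Consider an anti-inflammatory diet rich in whole foods, vegetables, and omega-3 fatty acids",
    "Identify and eliminate potential food sensitivities",
    "Ensure adequate fiber intake to support gut microbiome health"],
   ["Balance blood sugar by reducing refined carbohydrates and increasing protein and healthy fats",
    "Consider intermittent fasting if appropriate for your condition"],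
   ["Reduce sodium intake and increase potassium-rich foods",
    "Include heart-healthy fats like olive oil and avocados"],
   ["Increase intake of omega-3 fatty acids and antioxidant-rich foods",
    "Consider Mediterranean diet pattern which supports brain health"],
   ["Establish a consistent sleep schedule with regular sleep and wake times",
    "Create a relaxing bedtime routine to signal the body it's time to sleep",
    "Optimize sleep environment: dark, quiet, cool room"],
   ["Consider evaluation for sleep apnea if you have symptoms like snoring or daytime fatigue",
    "Elevate head of bed if you experience nighttime breathing difficulties"],
   ["Incorporate strength training 2-3 times per week to support muscle and bone health",
    "Include flexibility exercises like stretching or yoga to improve joint mobility"],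
   ["Aim for 150 minutes of moderate aerobic activity weekly",
    "Consider interval training for cardiovascular health if appropriate for your fitness level"],
   ["Include daily movement for mood regulation and cognitive benefits",
    "Consider mind-body exercises like tai chi or yoga"],
   ["Practice daily mindfulness meditation or deep breathing exercises",
    "Consider cognitive behavioral techniques to manage stress responses",
    "Establish healthy boundaries in work and personal life"],
   ["Practice relaxation techniques before meals to support digestion",
    "Consider gut-directed hypnotherapy for digestive symptoms exacerbated by stress"],
   ["Monitor stress effects on blood pressure and heart rate",
    "Practice heart rate variability biofeedback techniques"],
   ["Minimize exposure to environmental allergens and toxins",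
    "Consider air purification in home and work environments",
    "Use non-toxic personal care and cleaning products"],
   ["Reduce exposure to endocrine-disrupting chemicals in food containers and products",
    "Create a low-EMF sleep environment by removing electronics from bedroom"]]

def catRules : List (String × List Nat) :=
  [("Diet", [0, 1, 2, 3]), ("Sleep", [4, 5]), ("Exercise", [6, 7, 8]),
   ("Stress Management", [9, 10, 11]), ("Environmental", [12, 13])]

-- fired = set(); for system in affected_systems: fired.update(SYSTEM_RULES.get(system, ()))
def firedSet (xs : List (String × Int)) : PySem.Set Nat :=
  xs.foldl (fun f p => PySem.Set.update f (sysRules p.1)) PySem.Set.empty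

def suggest_lifestyle_interventions_alt (affected_systems : List (String × Int)) : List (String × List String) :=
  let fired := firedSet affected_systems
  -- RULE_MSGS[i]: every index in CATEGORY_RULES is a valid literal index (0..13), so getD is exact here
  catRules.foldl (fun out ci =>
    let msgs := (ci.2.filter (fun i => PySem.Set.contains fired i)).flatMap (fun i => ruleMsgs.getD i [])
    if msgs.isEmpty then out else out ++ [(ci.1, msgs)]) []

-- ===== PRECONDITION & SPEC =====
def Spec_suggest_lifestyle_interventions (affected_systems : List (String × Int)) (out : List (String × List String)) : Prop := out = suggest_lifestyle_interventions_alt affected_systems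
instance (affected_systems : List (String × Int)) (out : List (String × List String)) : Decidable (Spec_suggest_lifestyle_interventions affected_systems out) := by unfold Spec_suggest_lifestyle_interventions; infer_instance

-- ===== CLAIM (what is proved, stated in full; the proofs are below) =====
def Claim_equal_suggest_lifestyle_interventions : Prop := ∀ (affected_systems : List (String × Int)), Dom_suggest_lifestyle_interventions affected_systems → Spec_suggest_lifestyle_interventions affected_systems (suggest_lifestyle_interventions affected_systems)

-- ===== LEMMAS AND PROOFS =====

-- the truth value of "rule j fired", as a function of the ten membership booleans
def fTable (bDig bImm bMet bEnd bCar bNeu bMH bMus bRes bInt : Bool) (j : Nat) : Bool :=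
  [bDig || bImm || bMet, bEnd || bMet, bCar, bNeu || bMH, bNeu || bEnd || bMH,
   bRes || bCar, bMus || bMet, bCar || bRes, bMH || bNeu, bMH || bNeu || bEnd,
   bDig || bImm, bCar, bRes || bImm || bInt, bNeu || bEnd].getD j false

theorem pv_fTable_big (bDig bImm bMet bEnd bCar bNeu bMH bMus bRes bInt : Bool) (j : Nat) :
    fTable bDig bImm bMet bEnd bCar bNeu bMH bMus bRes bInt (j + 14) = false := by
  apply List.getD_eq_default
  simp

theorem pv_contains_add (s : PySem.Set Nat) (x y : Nat) :
    PySem.Set.contains (PySem.Set.add s x) y = (PySem.Set.contains s y || y == x) := by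
  simp only [PySem.Set.contains]
  rw [Bool.eq_iff_iff]
  simp [PySem.Set.mem_add s x y]

theorem pv_contains_update (l : List Nat) (s : PySem.Set Nat) (j : Nat) :
    PySem.Set.contains (PySem.Set.update s l) j = (PySem.Set.contains s j || l.contains j) := by
  induction l generalizing s with
  | nil => simp [PySem.Set.update]
  | cons a l ih =>
      simp only [PySem.Set.update, List.foldl_cons] at *
      rw [ih, pv_contains_add, List.contains_cons, Bool.or_assoc]

theorem pv_fired_any (xs : List (String × Int)) (j : Nat) :
    PySem.Set.contains (firedSet xs) j = xs.any (fun p => (sysRules p.1).contains j) := by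
  suffices h : ∀ (s : PySem.Set Nat),
      PySem.Set.contains (xs.foldl (fun f p => PySem.Set.update f (sysRules p.1)) s) j
        = (PySem.Set.contains s j || xs.any (fun p => (sysRules p.1).contains j)) by
    simpa [firedSet, PySem.Set.empty, PySem.Set.contains] using h PySem.Set.empty
  induction xs with
  | nil => simp
  | cons p xs ih =>
      intro s
      simp only [List.foldl_cons, List.any_cons]
      rw [ih, pv_contains_update, Bool.or_assoc]

theorem pv_any_or {α : Type} (xs : List α) (f g : α → Bool) :
    xs.any (fun a => f a || g a) = (xs.any f || xs.any g) := by
  induction xs with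
  | nil => rfl
  | cons a xs ih =>
      simp only [List.any_cons, ih]
      cases f a <;> cases g a <;> simp

theorem pv_any_key (xs : List (String × Int)) (t : String) :
    xs.any (fun p => p.1 == t) = hasKey xs t := by
  induction xs with
  | nil => rfl
  | cons p xs ih => simp_all [hasKey, BEq.comm]

theorem pv_sysRules_contains (s : String) :
    ((sysRules s).contains 0 = (s == "Digestive" || s == "Immune" || s == "Metabolic"))
  ∧ ((sysRules s).contains 1 = (s == "Endocrine" || s == "Metabolic"))
  ∧ ((sysRules s).contains 2 = (s == "Cardiovascular"))
  ∧ ((sysRules s).contains 3 = (s == "Neurological" || s == "Mental Health"))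
  ∧ ((sysRules s).contains 4 = (s == "Neurological" || s == "Endocrine" || s == "Mental Health"))
  ∧ ((sysRules s).contains 5 = (s == "Respiratory" || s == "Cardiovascular"))
  ∧ ((sysRules s).contains 6 = (s == "Musculoskeletal" || s == "Metabolic"))
  ∧ ((sysRules s).contains 7 = (s == "Cardiovascular" || s == "Respiratory"))
  ∧ ((sysRules s).contains 8 = (s == "Mental Health" || s == "Neurological"))
  ∧ ((sysRules s).contains 9 = (s == "Mental Health" || s == "Neurological" || s == "Endocrine"))
  ∧ ((sysRules s).contains 10 = (s == "Digestive" || s == "Immune"))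
  ∧ ((sysRules s).contains 11 = (s == "Cardiovascular"))
  ∧ ((sysRules s).contains 12 = (s == "Respiratory" || s == "Immune" || s == "Integumentary"))
  ∧ ((sysRules s).contains 13 = (s == "Neurological" || s == "Endocrine")) := by
  unfold sysRules
  repeat' split
  all_goals simp_all

theorem pv_sysRules_contains_big (s : String) (j : Nat) :
    (sysRules s).contains (j + 14) = false := by
  unfold sysRules
  repeat' split
  all_goals simp

theorem pv_fired_fun (xs : List (String × Int)) :
    (fun i => PySem.Set.contains (firedSet xs) i)
      = fTable (hasKey xs "Digestive") (hasKey xs "Immune") (hasKey xs "Metabolic")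
               (hasKey xs "Endocrine") (hasKey xs "Cardiovascular") (hasKey xs "Neurological")
               (hasKey xs "Mental Health") (hasKey xs "Musculoskeletal") (hasKey xs "Respiratory")
               (hasKey xs "Integumentary") := by
  funext j
  rw [pv_fired_any]
  rcases j with _|_|_|_|_|_|_|_|_|_|_|_|_|_|j
  case succ.succ.succ.succ.succ.succ.succ.succ.succ.succ.succ.succ.succ.succ =>
    have hj : j + 1 + 1 + 1 + 1 + 1 + 1 + 1 + 1 + 1 + 1 + 1 + 1 + 1 + 1 = j + 14 := by omega
    simp only [hj, pv_sysRules_contains_big, pv_fTable_big]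
    simp
  all_goals
    simp only [fun s => (pv_sysRules_contains s).1,
               fun s => (pv_sysRules_contains s).2.1,
               fun s => (pv_sysRules_contains s).2.2.1,
               fun s => (pv_sysRules_contains s).2.2.2.1,
               fun s => (pv_sysRules_contains s).2.2.2.2.1,
               fun s => (pv_sysRules_contains s).2.2.2.2.2.1,
               fun s => (pv_sysRules_contains s).2.2.2.2.2.2.1,
               fun s => (pv_sysRules_contains s).2.2.2.2.2.2.2.1,
               fun s => (pv_sysRules_contains s).2.2.2.2.2.2.2.2.1,
               fun s => (pv_sysRules_contains s).2.2.2.2.2.2.2.2.2.1,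
               fun s => (pv_sysRules_contains s).2.2.2.2.2.2.2.2.2.2.1,
               fun s => (pv_sysRules_contains s).2.2.2.2.2.2.2.2.2.2.2.1,
               fun s => (pv_sysRules_contains s).2.2.2.2.2.2.2.2.2.2.2.2.1,
               fun s => (pv_sysRules_contains s).2.2.2.2.2.2.2.2.2.2.2.2.2,
               pv_any_or, pv_any_key, fTable]
  all_goals rfl

-- ===== VERDICT (by name: the statement is the Claim_ definition above) =====
set_option maxRecDepth 8192 in
set_option maxHeartbeats 4000000 in
theorem suggest_lifestyle_interventions_spec : Claim_equal_suggest_lifestyle_interventions := by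
  intro xs _
  show suggest_lifestyle_interventions xs = suggest_lifestyle_interventions_alt xs
  simp only [suggest_lifestyle_interventions_alt]
  rw [pv_fired_fun]
  unfold suggest_lifestyle_interventions
  generalize hasKey xs "Digestive" = b1
  generalize hasKey xs "Immune" = b2
  generalize hasKey xs "Metabolic" = b3
  generalize hasKey xs "Endocrine" = b4
  generalize hasKey xs "Cardiovascular" = b5
  generalize hasKey xs "Neurological" = b6
  generalize hasKey xs "Mental Health" = b7
  generalize hasKey xs "Musculoskeletal" = b8
  generalize hasKey xs "Respiratory" = b9
  generalize hasKey xs "Integumentary" = b10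
  cases b1 <;> cases b2 <;> cases b3 <;> cases b4 <;> cases b5 <;>
    cases b6 <;> cases b7 <;> cases b8 <;> cases b9 <;> cases b10 <;> rfl
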